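-- pv_equiv track=rewrite | github.com/bryanptom/text-alignment-toolkit | code/align.py | combine_step_groups
-- ===== SOURCE A (Python) =====
-- MIN_EQUAL_DIST = 10
--
-- def combine_step_groups(steps):
--     step_groups = []
--     cur_group = []
--
--     flag_equal_longer_ten = False
--
--     for i in range(len(steps)):
--
--         if steps[i][0] == 'equal':
--             if steps[i][2] - steps[i][1] > MIN_EQUAL_DIST:
--                 step_groups.append(cur_group)
--                 step_groups.append([steps[i]])
--                 cur_group = []
--
--                 flag_equal_longer_ten = True
--             else:
--                 cur_group.append(steps[i])
--         else:
--             cur_group.append(steps[i])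
--
--     step_groups.append(cur_group)
--     return step_groups, flag_equal_longer_ten
-- ===== SOURCE B (Python) =====
-- MIN_EQUAL_DIST = 10
--
--
-- def _first_split(steps):
--     """Return (i, s) for the first long-'equal' step, or None."""
--     for i, s in enumerate(steps):
--         if s[0] == 'equal' and s[2] - s[1] > MIN_EQUAL_DIST:
--             return i, s
--     return None
--
--
-- def combine_step_groups(steps):
--     hit = _first_split(steps)
--     if hit is None:
--         return [steps], False
--     i, s = hit
--     rest_groups, _ = combine_step_groups(steps[i + 1:])
--     return [steps[:i], [s]] + rest_groups, True
-- ===== Notes on version B (the rewrite author's own statement) =====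
-- stated objective: alternative
-- what changed: Replaced A's single accumulator loop (current-group list plus flag state) by a recursive split-at-first-long-equal decomposition: find the first long 'equal' step, emit the prefix and the singleton, and recurse on the suffix.
import Mathlib
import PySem

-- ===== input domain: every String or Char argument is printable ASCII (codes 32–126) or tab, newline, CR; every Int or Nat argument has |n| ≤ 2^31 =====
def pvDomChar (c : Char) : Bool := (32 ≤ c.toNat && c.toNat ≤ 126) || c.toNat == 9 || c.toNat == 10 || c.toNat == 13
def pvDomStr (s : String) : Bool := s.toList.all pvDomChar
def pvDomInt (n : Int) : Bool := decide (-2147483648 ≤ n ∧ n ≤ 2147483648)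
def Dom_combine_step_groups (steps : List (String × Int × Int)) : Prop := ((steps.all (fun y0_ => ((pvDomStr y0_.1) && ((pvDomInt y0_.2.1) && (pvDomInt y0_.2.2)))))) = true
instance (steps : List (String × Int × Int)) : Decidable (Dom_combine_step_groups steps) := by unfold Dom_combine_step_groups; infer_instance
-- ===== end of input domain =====

-- B replaces A's accumulator loop by a recursive split-at-first-long-equal decomposition (alternative, same behaviour).


-- ===== PORT A =====
-- A's loop `for i in range(len(steps))` reads steps[i] in order; ported as structural
-- recursion over the list carrying the same state (step_groups, cur_group, flag).
def pvGoA : List (List (String × Int × Int)) → List (String × Int × Int) → Bool →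
    List (String × Int × Int) → (List (List (String × Int × Int))) × Bool
  | groups, cur, flag, [] => (groups ++ [cur], flag)
  | groups, cur, flag, s :: rest =>
    if s.1 == "equal" then
      if 10 < s.2.2 - s.2.1 then
        pvGoA (groups ++ [cur, [s]]) [] true rest
      else
        pvGoA groups (cur ++ [s]) flag rest
    else
      pvGoA groups (cur ++ [s]) flag rest

def combine_step_groups (steps : List (String × Int × Int)) : (List (List (String × Int × Int))) × Bool :=
  pvGoA [] [] false steps

-- ===== PORT B =====
def pvIsSplit (s : String × Int × Int) : Bool := s.1 == "equal" && decide (10 < s.2.2 - s.2.1)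

-- _first_split: first (index, step) with a long 'equal' step, or none
def pvFirstSplit : List (String × Int × Int) → Option (Nat × (String × Int × Int))
  | [] => none
  | s :: rest =>
    if pvIsSplit s then some (0, s)
    else (pvFirstSplit rest).map (fun p => (p.1 + 1, p.2))

theorem pvFirstSplit_lt {steps : List (String × Int × Int)} {i : Nat} {s : String × Int × Int}
    (h : pvFirstSplit steps = some (i, s)) : i < steps.length := by
  induction steps generalizing i s with
  | nil => simp [pvFirstSplit] at h
  | cons a rest ih =>
    simp only [pvFirstSplit] at h
    split at h
    · simp at h
      obtain ⟨h1, h2⟩ := h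
      simp only [List.length_cons]
      omega
    · cases hr : pvFirstSplit rest with
      | none => simp [hr] at h
      | some p =>
        simp [hr] at h
        obtain ⟨h1, h2⟩ := h
        have := ih (i := p.1) (s := p.2) (by simp [hr])
        simp [List.length_cons]
        omega

-- steps[:i] and steps[i+1:] with nonnegative indices are exactly take/drop (both clamp)
def combine_step_groups_alt (steps : List (String × Int × Int)) : (List (List (String × Int × Int))) × Bool :=
  match h : pvFirstSplit steps with
  | none => ([steps], false)
  | some (i, s) =>
    let rest := combine_step_groups_alt (steps.drop (i + 1))
    ([steps.take i, [s]] ++ rest.1, true)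
termination_by steps.length
decreasing_by
  have := pvFirstSplit_lt h
  simp [List.length_drop]
  omega

-- ===== PRECONDITION & SPEC =====
def Spec_combine_step_groups (steps : List (String × Int × Int)) (out : (List (List (String × Int × Int))) × Bool) : Prop := out = combine_step_groups_alt steps
instance (steps : List (String × Int × Int)) (out : (List (List (String × Int × Int))) × Bool) : Decidable (Spec_combine_step_groups steps out) := by unfold Spec_combine_step_groups; infer_instance

-- ===== CLAIM (what is proved, stated in full; the proofs are below) =====
def Claim_equal_combine_step_groups : Prop := ∀ (steps : List (String × Int × Int)), Dom_combine_step_groups steps → Spec_combine_step_groups steps (combine_step_groups steps)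

-- ===== LEMMAS AND PROOFS =====

theorem alt_none {steps : List (String × Int × Int)} (h : pvFirstSplit steps = none) :
    combine_step_groups_alt steps = ([steps], false) := by
  rw [combine_step_groups_alt]; split <;> simp_all

theorem alt_some {steps : List (String × Int × Int)} {i : Nat} {s : String × Int × Int}
    (h : pvFirstSplit steps = some (i, s)) :
    combine_step_groups_alt steps =
      ([steps.take i, [s]] ++ (combine_step_groups_alt (steps.drop (i + 1))).1, true) := by
  rw [combine_step_groups_alt]; split <;> simp_all

theorem goA_eq (steps : List (String × Int × Int)) :
    ∀ groups cur flag,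
      pvGoA groups cur flag steps =
        match pvFirstSplit steps with
        | none => (groups ++ [cur ++ steps], flag)
        | some (i, s) =>
            (groups ++ (cur ++ steps.take i) :: [s] :: (combine_step_groups_alt (steps.drop (i + 1))).1, true) := by
  induction steps with
  | nil => intro groups cur flag; simp [pvGoA, pvFirstSplit]
  | cons a rest ih =>
    intro groups cur flag
    by_cases hsplit : pvIsSplit a = true
    · have hEq : a.1 == "equal" := by
        simp [pvIsSplit] at hsplit; simp [hsplit.1]
      have hGt : 10 < a.2.2 - a.2.1 := by
        simp [pvIsSplit] at hsplit; exact hsplit.2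
      simp only [pvGoA, hEq, if_true, if_pos hGt, pvFirstSplit, hsplit]
      rw [ih]
      cases hr : pvFirstSplit rest with
      | none => simp [alt_none hr]
      | some p =>
        obtain ⟨j, t⟩ := p
        simp [alt_some hr]
    · have hstep : pvGoA groups cur flag (a :: rest) = pvGoA groups (cur ++ [a]) flag rest := by
        simp only [pvIsSplit, Bool.and_eq_true, decide_eq_true_eq] at hsplit
        by_cases hEq : a.1 == "equal"
        · have : ¬ (10 < a.2.2 - a.2.1) := fun hg => hsplit ⟨hEq, hg⟩
          simp [pvGoA, hEq, this]
        · simp [pvGoA, hEq]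
      rw [hstep, ih]
      simp only [pvFirstSplit, hsplit, if_false, Bool.false_eq_true]
      cases hr : pvFirstSplit rest with
      | none => simp
      | some p =>
        obtain ⟨j, t⟩ := p
        simp [List.take_succ_cons, List.drop_succ_cons, List.append_assoc]

-- ===== VERDICT (by name: the statement is the Claim_ definition above) =====
theorem combine_step_groups_spec : Claim_equal_combine_step_groups := by
  intro steps _
  unfold Spec_combine_step_groups combine_step_groups
  rw [goA_eq]
  cases hr : pvFirstSplit steps with
  | none => simp [alt_none hr]
  | some p =>
    obtain ⟨i, s⟩ := p
    simp [alt_some hr]
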